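-- pv_equiv track=rewrite | github.com/AirlineDog/Points-Cover | points_cover.py | not_contained
-- ===== SOURCE A (Python) =====
-- def not_contained(small, big):
--     """Checks if the small line is contained in the big list of lines"""
--     for z in range(len(big)):
--         for i in range(len(big[z]) - len(small) + 1):
--             for j in range(len(small)):
--                 if big[z][i + j] != small[j]:
--                     break
--             else:
--                 return False
--     return True
-- ===== SOURCE B (Python) =====
-- def _occurs(small, line):
--     """True iff small occurs as a contiguous block of line: test whether small
--     is a prefix, else strip the first element and repeat."""
--     m = len(small)
--     while True:
--         if line[:m] == small:
--             return True
--         if not line: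
--             return False
--         line = line[1:]
--
--
-- def not_contained(small, big):
--     """Checks if the small line is contained in the big list of lines"""
--     return not any(_occurs(small, line) for line in big)
-- ===== Notes on version B (the rewrite author's own statement) =====
-- stated objective: simpler
-- what changed: replaces the triple nested index loop (position i, element j, for-else break) by a structural prefix-stripping scan: per line, test whether small is a prefix, else drop the head and recurse, wrapped in a single 'not any(...)'
import Mathlib
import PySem

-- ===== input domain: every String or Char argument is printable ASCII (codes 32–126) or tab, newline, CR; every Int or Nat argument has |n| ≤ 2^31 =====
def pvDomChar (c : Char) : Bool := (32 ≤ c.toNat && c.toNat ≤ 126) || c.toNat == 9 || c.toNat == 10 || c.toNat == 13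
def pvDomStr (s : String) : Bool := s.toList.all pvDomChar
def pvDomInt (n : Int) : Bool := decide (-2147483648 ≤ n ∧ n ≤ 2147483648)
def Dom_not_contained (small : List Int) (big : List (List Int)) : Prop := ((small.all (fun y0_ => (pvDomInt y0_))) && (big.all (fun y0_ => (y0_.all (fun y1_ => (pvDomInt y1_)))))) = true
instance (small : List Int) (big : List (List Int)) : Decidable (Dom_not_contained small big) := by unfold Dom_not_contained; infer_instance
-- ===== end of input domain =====

-- B replaces A's triple nested index loop by a prefix-stripping structural scan per line
-- wrapped in a single not-any; same values everywhere, a simpler decomposition (no speed claim).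


-- ===== PORT A =====
-- the middle/inner loops of A: for i in range(len(big[z]) - len(small) + 1): for j in range(len(small)): …
-- indices i + j and j are always in range, so the pyGetD default 0 is never read
def aLineMatch (small line : List Int) : Bool :=
  (PySem.List.pyRange 0 (PySem.List.len line - PySem.List.len small + 1) 1).any (fun i =>
    (PySem.List.pyRange 0 (PySem.List.len small) 1).all (fun j =>
      PySem.List.pyGetD line (i + j) 0 == PySem.List.pyGetD small j 0))

-- for z in range(len(big)): … return False / return True  (big[z] is always in range, default [] never read)
def not_contained (small : List Int) (big : List (List Int)) : Bool :=
  !((PySem.List.pyRange 0 (PySem.List.len big) 1).any (fun z =>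
      aLineMatch small (PySem.List.pyGetD big z [])))

-- ===== PORT B =====
-- _occurs of Source B: line[:m] == small, else strip the head and repeat (structural recursion on line)
def occursTail (small : List Int) : List Int → Bool
  | [] => List.take small.length [] == small
  | a :: t => (List.take small.length (a :: t) == small) || occursTail small t

def not_contained_alt (small : List Int) (big : List (List Int)) : Bool :=
  !(big.any (fun line => occursTail small line))

-- ===== PRECONDITION & SPEC =====
def Spec_not_contained (small : List Int) (big : List (List Int)) (out : Bool) : Prop := out = not_contained_alt small big
instance (small : List Int) (big : List (List Int)) (out : Bool) : Decidable (Spec_not_contained small big out) := by unfold Spec_not_contained; infer_instance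

-- ===== CLAIM (what is proved, stated in full; the proofs are below) =====
def Claim_equal_not_contained : Prop := ∀ (small : List Int) (big : List (List Int)), Dom_not_contained small big → Spec_not_contained small big (not_contained small big)

-- ===== LEMMAS AND PROOFS =====

-- B's per-line scan decides "small is a contiguous infix of line"
theorem occursTail_iff_infix (small line : List Int) :
    occursTail small line = true ↔ small <:+: line := by
  induction line with
  | nil =>
      simp only [occursTail, List.take_nil, beq_iff_eq, List.infix_nil]
      exact eq_comm
  | cons a t ih =>
      simp only [occursTail, Bool.or_eq_true, beq_iff_eq, ih, List.infix_cons_iff,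
        List.prefix_iff_eq_take]
      exact or_congr eq_comm Iff.rfl

-- A's per-line double loop decides the same predicate
theorem aLineMatch_iff_infix (small line : List Int) :
    aLineMatch small line = true ↔ small <:+: line := by
  unfold aLineMatch
  simp only [List.any_eq_true, List.all_eq_true, PySem.List.mem_pyRange_one, PySem.List.len_eq,
    beq_iff_eq]
  constructor
  · rintro ⟨i, ⟨hi0, hi1⟩, hall⟩
    have hmn : small.length ≤ line.length := by omega
    have hkey : (line.drop i.toNat).take small.length = small := by
      apply List.ext_getElem
      · simp only [List.length_take, List.length_drop]; omega
      · intro j hj1 hj2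
        have hjm : (j : Int) < small.length := by
          simp only [List.length_take, List.length_drop] at hj1; exact_mod_cast (by omega : j < small.length)
        have := hall (j : Int) ⟨by positivity, hjm⟩
        have hij : i + (j : Int) = ((i.toNat + j : Nat) : Int) := by omega
        rw [hij, PySem.List.pyGetD_natCast, PySem.List.pyGetD_natCast] at this
        have hlt : i.toNat + j < line.length := by omega
        have hjlt : j < small.length := by omega
        rw [List.getD_eq_getElem _ _ hlt, List.getD_eq_getElem _ _ hjlt] at this
        simpa [List.getElem_take, List.getElem_drop] using this
    exact hkey ▸ (((line.drop i.toNat).take_prefix small.length).isInfix.trans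
      (line.drop_suffix i.toNat).isInfix)
  · rintro ⟨p, q, rfl⟩
    refine ⟨(p.length : Int), ⟨by positivity, ?_⟩, ?_⟩
    · simp only [List.length_append]; omega
    · intro j ⟨hj0, hjm⟩
      have hj : j = ((j.toNat : Nat) : Int) := by omega
      have hjlt : j.toNat < small.length := by omega
      have hidx : (p.length : Int) + j = ((p.length + j.toNat : Nat) : Int) := by omega
      rw [hidx, hj, PySem.List.pyGetD_natCast, PySem.List.pyGetD_natCast]
      simp only [Int.toNat_natCast]
      have hlt : p.length + j.toNat < (p ++ small ++ q).length := by
        simp only [List.length_append]; omega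
      rw [List.getD_eq_getElem _ _ hlt, List.getD_eq_getElem _ _ hjlt]
      simp only [List.getElem_append, List.length_append]
      rw [dif_pos (by omega), dif_neg (by omega)]
      congr 1
      omega

theorem line_eq (small line : List Int) : aLineMatch small line = occursTail small line := by
  have h1 := aLineMatch_iff_infix small line
  have h2 := occursTail_iff_infix small line
  cases ha : aLineMatch small line <;> cases hb : occursTail small line <;> simp_all

theorem range_any_getD {α : Type} (l : List α) (d : α) (f : α → Bool) :
    (List.range l.length).any (fun k => f (l.getD k d)) = l.any f := by
  rw [Bool.eq_iff_iff]
  simp only [List.any_eq_true, List.mem_range]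
  constructor
  · rintro ⟨k, hk, hf⟩
    exact ⟨l[k], List.getElem_mem hk, by rwa [List.getD_eq_getElem _ _ hk] at hf⟩
  · rintro ⟨x, hx, hf⟩
    obtain ⟨k, hk, rfl⟩ := List.mem_iff_getElem.mp hx
    exact ⟨k, hk, by rwa [List.getD_eq_getElem _ _ hk]⟩

-- ===== VERDICT (by name: the statement is the Claim_ definition above) =====
theorem not_contained_spec : Claim_equal_not_contained := by
  intro small big _
  unfold Spec_not_contained not_contained not_contained_alt
  rw [PySem.List.len_eq, PySem.List.pyRange_one]
  simp only [List.any_map, Function.comp_def, zero_add, Int.sub_zero, Int.toNat_natCast,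
    PySem.List.pyGetD_natCast, line_eq]
  rw [range_any_getD big [] (fun line => occursTail small line)]
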